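-- pv_equiv track=rewrite | github.com/RiyadSheikh27/Programming-Languages | Python/Problem_solving/lab_problem2.py | dfs
-- ===== SOURCE A (Python) =====
-- def is_valid(x, y, grid):
--     return 0 <= x < len(grid) and 0 <= y < len(grid[0]) and grid[x][y] != 0
--
-- def dfs(start, destination, grid, visited, moves):
--     x, y = start
--
--     if start == destination:
--         return True
--
--     visited.add(start)
--
--     directions = [(1, 0), (0, 1)]
--     moves_desc = ['Moving Down', 'Moving Right']
--
--     for idx, (dx, dy) in enumerate(directions):
--         new_x, new_y = x + dx, y + dy
--
--         if is_valid(new_x, new_y, grid) and (new_x, new_y) not in visited: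
--             moves.append(moves_desc[idx] + f" ({new_x}, {new_y})")
--             if dfs((new_x, new_y), destination, grid, visited, moves):
--                 return True
--
--     return False
-- ===== SOURCE B (Python) =====
-- def is_valid(x, y, grid):
--     return 0 <= x < len(grid) and 0 <= y < len(grid[0]) and grid[x][y] != 0
--
-- def dfs(start, destination, grid, visited, moves):
--     if start == destination:
--         return True
--     x, y = start
--     visited.add(start)
--     stack = [(x, y, 0)]
--     while stack:
--         cx, cy, i = stack.pop()
--         if i == 2:
--             continue
--         stack.append((cx, cy, i + 1))
--         nx, ny = (cx + 1, cy) if i == 0 else (cx, cy + 1)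
--         if is_valid(nx, ny, grid) and (nx, ny) not in visited:
--             moves.append(('Moving Down' if i == 0 else 'Moving Right') + f" ({nx}, {ny})")
--             if (nx, ny) == destination:
--                 return True
--             visited.add((nx, ny))
--             stack.append((nx, ny, 0))
--     return False
-- ===== Notes on version B (the rewrite author's own statement) =====
-- stated objective: alternative
-- what changed: The recursive DFS is replaced by an iterative DFS over an explicit stack of (cell, next-direction-index) frames, with the destination test and visited/moves updates done at push time instead of at call entry; same moves/visited mutations, same traversal order, no recursion.
-- outside the precondition, e.g. on dfs((0, 0), (1, 1), [[1, 0], [0]], set(), []): A returns False, B returns False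
import Mathlib
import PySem

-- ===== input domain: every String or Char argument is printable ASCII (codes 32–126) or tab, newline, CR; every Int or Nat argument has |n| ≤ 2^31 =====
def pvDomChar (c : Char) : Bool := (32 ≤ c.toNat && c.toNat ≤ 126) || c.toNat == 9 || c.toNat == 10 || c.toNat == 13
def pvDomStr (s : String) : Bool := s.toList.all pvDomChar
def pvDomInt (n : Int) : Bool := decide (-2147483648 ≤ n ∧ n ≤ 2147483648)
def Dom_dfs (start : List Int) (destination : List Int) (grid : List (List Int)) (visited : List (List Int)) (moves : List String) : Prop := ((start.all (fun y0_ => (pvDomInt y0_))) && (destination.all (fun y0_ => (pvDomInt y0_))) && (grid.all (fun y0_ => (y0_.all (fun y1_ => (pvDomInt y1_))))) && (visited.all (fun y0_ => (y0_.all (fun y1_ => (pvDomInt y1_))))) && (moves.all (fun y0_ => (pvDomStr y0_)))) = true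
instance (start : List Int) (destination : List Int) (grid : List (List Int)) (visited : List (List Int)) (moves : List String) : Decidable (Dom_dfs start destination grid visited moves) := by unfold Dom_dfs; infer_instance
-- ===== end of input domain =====

-- B replaces the recursive DFS by an iterative DFS over an explicit stack of (cell, next-direction) frames
-- (same traversal order, same visited/moves mutations); the proved equivalence is about the RETURN value only.

-- shared helpers: is_valid (both Pythons define it verbatim), directions[idx] lookup, the appended move string
def pvCols (grid : List (List Int)) : Int :=
  match grid with
  | [] => 0
  | r :: _ => (r.length : Int)

def pvIsValid (x y : Int) (grid : List (List Int)) : Bool :=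
  if 0 ≤ x ∧ x < (grid.length : Int) then
    if 0 ≤ y ∧ y < pvCols grid then
      decide (PySem.List.pyGetD (PySem.List.pyGetD grid x []) y 0 ≠ 0)
    else false
  else false

def pvStep (cx cy : Int) (i : Nat) : Int × Int :=
  if i = 0 then (cx + 1, cy) else (cx, cy + 1)

def pvMoveStr (i : Nat) (nx ny : Int) : String :=
  (if i = 0 then "Moving Down" else "Moving Right") ++ " (" ++ PySem.Int.toStr nx ++ ", " ++ PySem.Int.toStr ny ++ ")"

-- termination helpers (cited by the ports' decreasing_by; kept omega-free and small on purpose)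
def pvMeas (x y : Int) (grid : List (List Int)) : Nat :=
  ((grid.length : Int) + pvCols grid - (x + y)).toNat

lemma pvIsValid_bounds {x y : Int} {grid : List (List Int)} (h : pvIsValid x y grid = true) :
    0 ≤ x ∧ x < (grid.length : Int) ∧ 0 ≤ y ∧ y < pvCols grid := by
  unfold pvIsValid at h
  split_ifs at h with h1 h2
  · exact ⟨h1.1, h1.2, h2.1, h2.2⟩

lemma pvStep_zero (cx cy : Int) : pvStep cx cy 0 = (cx + 1, cy) := rfl

lemma pvStep_pos (cx cy : Int) {i : Nat} (h : i ≠ 0) : pvStep cx cy i = (cx, cy + 1) := by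
  rw [pvStep, if_neg h]

lemma pvStep_sum (cx cy : Int) (i : Nat) : (pvStep cx cy i).1 + (pvStep cx cy i).2 = cx + cy + 1 := by
  by_cases h : i = 0
  · rw [h, pvStep_zero]
    exact add_right_comm cx 1 cy
  · rw [pvStep_pos cx cy h]
    exact (add_assoc cx cy 1).symm

lemma pvStep_le {cx cy : Int} {grid : List (List Int)} {i : Nat}
    (h : pvIsValid (pvStep cx cy i).1 (pvStep cx cy i).2 grid = true) :
    (pvStep cx cy i).1 + (pvStep cx cy i).2 ≤ (grid.length : Int) + pvCols grid - 2 := by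
  obtain ⟨h1, h2, h3, h4⟩ := pvIsValid_bounds h
  have e : ((grid.length : Int) - 1) + (pvCols grid - 1) = (grid.length : Int) + pvCols grid - 2 := by
    ring
  exact e ▸ add_le_add (Int.le_sub_one_of_lt h2) (Int.le_sub_one_of_lt h4)

lemma pvSubPos {i : Nat} (hi : ¬ 2 ≤ i) : 0 < 2 - i :=
  match i, hi with
  | 0, _ => by decide
  | 1, _ => by decide
  | k + 2, hi => absurd (Nat.le_add_left 2 k) hi

lemma pvSubLt {i : Nat} (hi : ¬ 2 ≤ i) : 2 - (i + 1) < 2 - i :=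
  match i, hi with
  | 0, _ => by decide
  | 1, _ => by decide
  | k + 2, hi => absurd (Nat.le_add_left 2 k) hi

lemma pvCoef {i : Nat} (hi : ¬ 2 ≤ i) : 3 - i = (2 - i) + 1 :=
  match i, hi with
  | 0, _ => rfl
  | 1, _ => rfl
  | k + 2, hi => absurd (Nat.le_add_left 2 k) hi

lemma pvMinEq {i : Nat} (hi : ¬ 2 ≤ i) : min i 2 = i ∧ min (i + 1) 2 = i + 1 :=
  match i, hi with
  | 0, _ => by decide
  | 1, _ => by decide
  | k + 2, hi => absurd (Nat.le_add_left 2 k) hi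

lemma pvExpSplit {L s : Int} (hle : s ≤ L - 2) :
    (L - (s - 1)).toNat = (L - s).toNat + 1 ∧ 0 < (L - s).toNat := by
  have h2 : 2 ≤ L - s := Int.le_sub_left_of_add_le (by
    have := Int.add_le_add_right hle 2
    rwa [Int.sub_add_cancel] at this)
  have h0 : (0 : Int) ≤ L - s := le_trans (by decide) h2
  constructor
  · have e : L - (s - 1) = (L - s) + 1 := by ring
    rw [e, Int.toNat_add h0 (by decide)]
    rfl
  · exact Int.lt_toNat.mpr (lt_of_lt_of_le (by decide) h2)

lemma pvSum_pred {cx cy nx ny : Int} (hsum : nx + ny = cx + cy + 1) :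
    cx + cy = (nx + ny) - 1 := by
  rw [hsum, Int.add_sub_cancel]

lemma pvMeas_step {cx cy : Int} {grid : List (List Int)} {i : Nat}
    (h : pvIsValid (pvStep cx cy i).1 (pvStep cx cy i).2 grid = true) :
    pvMeas (pvStep cx cy i).1 (pvStep cx cy i).2 grid + 1 = pvMeas cx cy grid ∧
    0 < pvMeas (pvStep cx cy i).1 (pvStep cx cy i).2 grid := by
  have hs := pvExpSplit (pvStep_le h)
  unfold pvMeas
  rw [pvSum_pred (pvStep_sum cx cy i)]
  exact ⟨hs.1.symm, hs.2⟩

lemma pvDecRecLoop (m : Nat) : 3 * m + (2 - 0) < 3 * m + 3 :=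
  Nat.add_lt_add_left (by decide) (3 * m)

lemma pvDecChild {a b : Nat} (i : Nat) (h : a + 1 = b) (hi : ¬ 2 ≤ i) :
    3 * a + 3 < 3 * b + (2 - i) := by
  have e : 3 * a + 3 = 3 * b := by rw [← h]; exact (Nat.mul_succ 3 a).symm
  rw [e]
  exact Nat.lt_add_of_pos_right (pvSubPos hi)

lemma pvDecNext (m : Nat) {i : Nat} (hi : ¬ 2 ≤ i) :
    3 * m + (2 - (i + 1)) < 3 * m + (2 - i) :=
  Nat.add_lt_add_left (pvSubLt hi) (3 * m)

-- ===== PORT A =====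
-- recursion dfsRec = Python dfs's body; dfsLoop = its 'for idx, (dx,dy) in enumerate(directions)' loop from index i,
-- threading the mutated (visited, moves) state
mutual
def dfsRec (x y : Int) (destination : List Int) (grid : List (List Int)) (visited : List (List Int)) (moves : List String) : Bool × List (List Int) × List String :=
  if [x, y] = destination then (true, visited, moves)
  else dfsLoop x y 0 destination grid (PySem.Set.add visited [x, y]) moves
termination_by (3 * pvMeas x y grid + 3 : Nat)
decreasing_by exact pvDecRecLoop (pvMeas x y grid)

def dfsLoop (x y : Int) (i : Nat) (destination : List Int) (grid : List (List Int)) (visited : List (List Int)) (moves : List String) : Bool × List (List Int) × List String :=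
  if h2 : 2 ≤ i then (false, visited, moves)
  else
    if hv : pvIsValid (pvStep x y i).1 (pvStep x y i).2 grid = true
            ∧ PySem.Set.contains visited [(pvStep x y i).1, (pvStep x y i).2] = false then
      let res := dfsRec (pvStep x y i).1 (pvStep x y i).2 destination grid visited
                        (moves ++ [pvMoveStr i (pvStep x y i).1 (pvStep x y i).2])
      if res.1 then res
      else dfsLoop x y (i + 1) destination grid res.2.1 res.2.2
    else dfsLoop x y (i + 1) destination grid visited moves
termination_by (3 * pvMeas x y grid + (2 - i) : Nat)
decreasing_by
  · exact pvDecChild i (pvMeas_step hv.1).1 h2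
  · exact pvDecNext (pvMeas x y grid) h2
  · exact pvDecNext (pvMeas x y grid) h2
end

def dfs (start : List Int) (destination : List Int) (grid : List (List Int)) (visited : List (List Int)) (moves : List String) : Bool :=
  match start with
  | [x, y] => (dfsRec x y destination grid visited moves).1
  | _ => false  -- Python raises ValueError unpacking start here; excluded by Pre_dfs

-- ===== PORT B =====
-- iterative DFS: the stack holds (cx, cy, next direction index) frames, head = top of stack
def pvPot (L : Int) : List (Int × Int × Nat) → Nat
  | [] => 0
  | f :: rest => (3 - min f.2.2 2) * 4 ^ (L - (f.1 + f.2.1)).toNat + pvPot L rest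

lemma pvPot_cons (L cx cy : Int) (i : Nat) (rest : List (Int × Int × Nat)) :
    pvPot L ((cx, cy, i) :: rest) = (3 - min i 2) * 4 ^ (L - (cx + cy)).toNat + pvPot L rest := rfl

lemma pvCoefLt {i : Nat} (hi : ¬ 2 ≤ i) : 3 - (i + 1) < 3 - i :=
  match i, hi with
  | 0, _ => by decide
  | 1, _ => by decide
  | k + 2, hi => absurd (Nat.le_add_left 2 k) hi

lemma pvPot_pop (L : Int) (f : Int × Int × Nat) (rest : List (Int × Int × Nat)) :
    pvPot L rest < pvPot L (f :: rest) := by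
  rw [show f = (f.1, f.2.1, f.2.2) from rfl, pvPot_cons]
  exact Nat.lt_add_of_pos_left
    (Nat.mul_pos (Nat.sub_pos_of_lt (lt_of_le_of_lt (Nat.min_le_right f.2.2 2) (by decide)))
      (Nat.pow_pos (by decide)))

lemma pvPot_next (L : Int) (cx cy : Int) {i : Nat} (rest : List (Int × Int × Nat)) (hi : ¬ 2 ≤ i) :
    pvPot L ((cx, cy, i + 1) :: rest) < pvPot L ((cx, cy, i) :: rest) := by
  rw [pvPot_cons, pvPot_cons, (pvMinEq hi).1, (pvMinEq hi).2]
  exact Nat.add_lt_add_right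
    ((Nat.mul_lt_mul_right (Nat.pow_pos (by decide))).mpr (pvCoefLt hi)) (pvPot L rest)

lemma pvPot_push (L cx cy nx ny : Int) {i : Nat} (rest : List (Int × Int × Nat))
    (hi : ¬ 2 ≤ i) (hsum : nx + ny = cx + cy + 1) (hle : nx + ny ≤ L - 2) :
    pvPot L ((nx, ny, 0) :: (cx, cy, i + 1) :: rest) < pvPot L ((cx, cy, i) :: rest) := by
  rw [pvPot_cons, pvPot_cons, pvPot_cons, (pvMinEq hi).1, (pvMinEq hi).2,
    show (3 : Nat) - min 0 2 = 3 from rfl, Nat.succ_sub_succ 2 i]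
  have hk : (L - (cx + cy)).toNat = (L - (nx + ny)).toNat + 1 := by
    rw [pvSum_pred hsum]; exact (pvExpSplit hle).1
  rw [hk, pow_succ]
  have hp : 0 < 4 ^ (L - (nx + ny)).toNat := Nat.pow_pos (by decide)
  have hsplit : (3 - i) * (4 ^ (L - (nx + ny)).toNat * 4)
      = (2 - i) * (4 ^ (L - (nx + ny)).toNat * 4) + 4 ^ (L - (nx + ny)).toNat * 4 := by
    rw [pvCoef hi, Nat.succ_mul]
  rw [hsplit]
  have hlt : 3 * 4 ^ (L - (nx + ny)).toNat < 4 ^ (L - (nx + ny)).toNat * 4 := by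
    rw [mul_comm (4 ^ (L - (nx + ny)).toNat) 4]
    exact (Nat.mul_lt_mul_right hp).mpr (by decide)
  calc 3 * 4 ^ (L - (nx + ny)).toNat
        + ((2 - i) * (4 ^ (L - (nx + ny)).toNat * 4) + pvPot L rest)
      = (2 - i) * (4 ^ (L - (nx + ny)).toNat * 4)
        + (3 * 4 ^ (L - (nx + ny)).toNat + pvPot L rest) :=
        add_left_comm (3 * 4 ^ (L - (nx + ny)).toNat)
          ((2 - i) * (4 ^ (L - (nx + ny)).toNat * 4)) (pvPot L rest)
    _ < (2 - i) * (4 ^ (L - (nx + ny)).toNat * 4)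
        + (4 ^ (L - (nx + ny)).toNat * 4 + pvPot L rest) :=
        Nat.add_lt_add_left (Nat.add_lt_add_right hlt (pvPot L rest)) _
    _ = (2 - i) * (4 ^ (L - (nx + ny)).toNat * 4) + 4 ^ (L - (nx + ny)).toNat * 4
        + pvPot L rest := (add_assoc _ _ _).symm

def pvMachine (stack : List (Int × Int × Nat)) (destination : List Int) (grid : List (List Int)) (visited : List (List Int)) (moves : List String) : Bool :=
  match stack with
  | [] => false
  | (cx, cy, i) :: rest =>
    if h2 : 2 ≤ i then pvMachine rest destination grid visited moves
    else
      if hv : pvIsValid (pvStep cx cy i).1 (pvStep cx cy i).2 grid = true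
              ∧ PySem.Set.contains visited [(pvStep cx cy i).1, (pvStep cx cy i).2] = false then
        if [(pvStep cx cy i).1, (pvStep cx cy i).2] = destination then true
        else pvMachine (((pvStep cx cy i).1, (pvStep cx cy i).2, 0) :: (cx, cy, i + 1) :: rest) destination grid
               (PySem.Set.add visited [(pvStep cx cy i).1, (pvStep cx cy i).2])
               (moves ++ [pvMoveStr i (pvStep cx cy i).1 (pvStep cx cy i).2])
      else pvMachine ((cx, cy, i + 1) :: rest) destination grid visited moves
termination_by pvPot ((grid.length : Int) + pvCols grid) stack
decreasing_by
  · exact pvPot_pop _ _ rest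
  · exact pvPot_push _ cx cy _ _ rest h2 (pvStep_sum cx cy i) (pvStep_le hv.1)
  · exact pvPot_next _ cx cy rest h2

def dfs_alt (start : List Int) (destination : List Int) (grid : List (List Int)) (visited : List (List Int)) (moves : List String) : Bool :=
  if start = destination then true
  else
    if start.length = 2 then
      pvMachine [(start.headD 0, start.tail.headD 0, 0)] destination grid
        (PySem.Set.add visited start) moves
    else false  -- Python raises ValueError unpacking start here; excluded by Pre_dfs

-- ===== PRECONDITION & SPEC =====
-- Pre_dfs excludes (a) start tuples without exactly two components, where A raises ValueError, and
-- (b) grids with a row shorter than row 0, where a reachable short row makes grid[x][y] raise IndexError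
-- (both Pythons); (b) over-approximates: on ragged grids whose short rows are never reached both return the same value.
def Pre_dfs (start : List Int) (destination : List Int) (grid : List (List Int)) (visited : List (List Int)) (moves : List String) : Prop :=
  start.length = 2 ∧ ∀ row ∈ grid, (grid.headD []).length ≤ row.length
instance (start : List Int) (destination : List Int) (grid : List (List Int)) (visited : List (List Int)) (moves : List String) : Decidable (Pre_dfs start destination grid visited moves) := by unfold Pre_dfs; infer_instance

def pvWitness_dfs : List Int × List Int × List (List Int) × List (List Int) × List String :=
  ([0, 0], [1, 1], [[1, 1], [0, 1]], [], [])

def Spec_dfs (start : List Int) (destination : List Int) (grid : List (List Int)) (visited : List (List Int)) (moves : List String) (out : Bool) : Prop := out = dfs_alt start destination grid visited moves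
instance (start : List Int) (destination : List Int) (grid : List (List Int)) (visited : List (List Int)) (moves : List String) (out : Bool) : Decidable (Spec_dfs start destination grid visited moves out) := by unfold Spec_dfs; infer_instance

-- ===== CLAIM (what is proved, stated in full; the proofs are below) =====
def Claim_equal_dfs : Prop := ∀ (start : List Int) (destination : List Int) (grid : List (List Int)) (visited : List (List Int)) (moves : List String), Dom_dfs start destination grid visited moves → Pre_dfs start destination grid visited moves → Spec_dfs start destination grid visited moves (dfs start destination grid visited moves)

-- ===== LEMMAS AND PROOFS =====

-- one stack frame of the machine behaves like one run of A's direction loop, then the rest of the stack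
-- on the state that loop leaves behind
lemma pvMachine_frame (n : Nat) :
    ∀ (x y : Int) (i : Nat) (rest : List (Int × Int × Nat)) (destination : List Int)
      (grid : List (List Int)) (visited : List (List Int)) (moves : List String),
      i ≤ 2 → 3 * pvMeas x y grid + (2 - i) ≤ n →
      pvMachine ((x, y, i) :: rest) destination grid visited moves =
        ((dfsLoop x y i destination grid visited moves).1
          || pvMachine rest destination grid (dfsLoop x y i destination grid visited moves).2.1
               (dfsLoop x y i destination grid visited moves).2.2) := by
  induction n using Nat.strong_induction_on with
  | _ n IH =>
    intro x y i rest destination grid visited moves hi hn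
    by_cases h2 : 2 ≤ i
    · rw [pvMachine, dif_pos h2, dfsLoop, dif_pos h2]
      simp
    · rw [pvMachine, dif_neg h2, dfsLoop, dif_neg h2]
      by_cases hv : pvIsValid (pvStep x y i).1 (pvStep x y i).2 grid = true
          ∧ PySem.Set.contains visited [(pvStep x y i).1, (pvStep x y i).2] = false
      · rw [dif_pos hv, dif_pos hv]
        have hm := pvMeas_step hv.1
        by_cases hd : [(pvStep x y i).1, (pvStep x y i).2] = destination
        · rw [if_pos hd]
          rw [dfsRec, if_pos hd]
          simp
        · rw [if_neg hd]
          rw [dfsRec, if_neg hd]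
          rw [IH (3 * pvMeas (pvStep x y i).1 (pvStep x y i).2 grid + 2) (by omega)
                (pvStep x y i).1 (pvStep x y i).2 0 _ _ _ _ _ (by omega) (by omega)]
          set r := dfsLoop (pvStep x y i).1 (pvStep x y i).2 0 destination grid
              (PySem.Set.add visited [(pvStep x y i).1, (pvStep x y i).2])
              (moves ++ [pvMoveStr i (pvStep x y i).1 (pvStep x y i).2]) with hr
          by_cases hb : r.1 = true
          · simp [hb]
          · simp only [Bool.not_eq_true] at hb
            rw [IH (3 * pvMeas x y grid + (2 - (i + 1))) (by omega)
                  x y (i + 1) rest _ _ _ _ (by omega) (by omega)]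
            simp [hb]
      · rw [dif_neg hv, dif_neg hv]
        rw [IH (3 * pvMeas x y grid + (2 - (i + 1))) (by omega)
              x y (i + 1) rest _ _ _ _ (by omega) (by omega)]

-- ===== VERDICT (by name: the statement is the Claim_ definition above) =====
theorem dfs_spec : Claim_equal_dfs := by
  intro start destination grid visited moves _ hpre
  unfold Spec_dfs
  obtain ⟨hlen, -⟩ := hpre
  rcases start with _ | ⟨a, _ | ⟨b, _ | ⟨c, t⟩⟩⟩ <;> simp at hlen
  have hA : dfs [a, b] destination grid visited moves = (dfsRec a b destination grid visited moves).1 := rfl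
  have hB : dfs_alt [a, b] destination grid visited moves
      = if [a, b] = destination then true
        else pvMachine [(a, b, 0)] destination grid (PySem.Set.add visited [a, b]) moves := by
    unfold dfs_alt
    rfl
  rw [hA, hB, dfsRec]
  by_cases hd : [a, b] = destination
  · rw [if_pos hd, if_pos hd]
  · rw [if_neg hd, if_neg hd]
    rw [pvMachine_frame (3 * pvMeas a b grid + 2) a b 0 [] destination grid
          (PySem.Set.add visited [a, b]) moves (by omega) (by omega)]
    rw [pvMachine]
    simp
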